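-- pv_equiv track=rewrite | github.com/exciteabletom/wordle-API | expressions.py | filter_expressions
-- ===== SOURCE A (Python) =====
-- import itertools
-- from typing import List, Optional, Tuple, Iterable
--
-- operators = [*"+-*/"]
--
-- def filter_expressions(filtered: Iterable) -> Iterable:
--     """Filter invalid mathematical expressions"""
--     filtered = filter(lambda x: x[0] not in operators, filtered)  # starts with an operator
--     filtered = filter(lambda x: x[-1] not in operators, filtered)  # ends with an operator
--     filtered = filter(lambda x: "00" not in x, filtered)  # contains 00
--     filtered = filter(lambda x: any(o in x for o in operators), filtered)  # doesnt contain an operator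
--
--     # contains two consecutive operators
--     double_operators = list(map(lambda x: "".join(x), itertools.product(operators, repeat=2)))
--     filtered = filter(lambda x: not any(o in x for o in double_operators), filtered)
--     return filtered
-- ===== SOURCE B (Python) =====
-- operators = [*"+-*/"]
--
-- def filter_expressions(filtered):
--     """Filter invalid mathematical expressions (single-pass generator)."""
--     ops = set("+-*/")
--
--     def gen():
--         for x in filtered:
--             if x[0] in ops or x[-1] in ops:
--                 continue
--             prev = ''
--             bad = False
--             has_op = False
--             for c in x:
--                 if c in ops:
--                     if prev in ops:
--                         bad = True
--                         break
--                     has_op = True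
--                 elif c == '0' and prev == '0':
--                     bad = True
--                     break
--                 prev = c
--             if not bad and has_op:
--                 yield x
--     return gen()
-- ===== Notes on version B (the rewrite author's own statement) =====
-- stated objective: faster
-- what changed: Replaced the chain of five filter() passes with substring scans (including the 16-entry itertools.product double-operator table) by a single lazy generator doing one character pass per string with a prev-character state; Pre_ excludes lists containing the empty string, on which both raise IndexError when consumed.
import Mathlib
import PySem

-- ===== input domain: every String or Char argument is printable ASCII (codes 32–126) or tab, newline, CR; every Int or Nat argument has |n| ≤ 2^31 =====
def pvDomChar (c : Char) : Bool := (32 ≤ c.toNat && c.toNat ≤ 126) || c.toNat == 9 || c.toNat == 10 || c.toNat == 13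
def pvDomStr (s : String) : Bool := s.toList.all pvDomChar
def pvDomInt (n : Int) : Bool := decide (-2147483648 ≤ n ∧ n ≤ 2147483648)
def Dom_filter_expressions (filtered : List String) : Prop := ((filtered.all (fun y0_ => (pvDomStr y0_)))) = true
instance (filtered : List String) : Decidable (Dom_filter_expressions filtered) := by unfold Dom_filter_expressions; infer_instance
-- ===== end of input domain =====

-- One honest line: B replaces A's five filter passes (with substring scans and the
-- itertools.product double-operator table) by one character pass per string; A returns a
-- lazy iterator in Python, equivalence is about the materialized sequence of kept strings.

-- ===== PORT A =====
-- operators = [*"+-*/"]  (a list of the four one-character strings; modelled as their characters)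
def pvOperators : List Char := ['+', '-', '*', '/']

def filter_expressions (filtered : List String) : List String :=
  -- x[0] not in operators  (none = IndexError on "", excluded by Pre_)
  let f1 := filtered.filter (fun x =>
    match PySem.List.pyGet? x.toList 0 with
    | some c => !pvOperators.contains c
    | none => false)
  -- x[-1] not in operators
  let f2 := f1.filter (fun x =>
    match PySem.List.pyGet? x.toList (-1) with
    | some c => !pvOperators.contains c
    | none => false)
  -- "00" not in x
  let f3 := f2.filter (fun x => !PySem.Chars.isIn ['0', '0'] x.toList)
  -- any(o in x for o in operators)
  let f4 := f3.filter (fun x => pvOperators.any (fun o => PySem.Chars.isIn [o] x.toList))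
  -- double_operators = ["".join(p) for p in itertools.product(operators, repeat=2)]
  let double_operators := pvOperators.flatMap (fun a => pvOperators.map (fun b => [a, b]))
  -- not any(o in x for o in double_operators)
  f4.filter (fun x => !double_operators.any (fun o => PySem.Chars.isIn o x.toList))

-- ===== PORT B =====
-- the inner character loop of Source B: state (prev, has_op), early return on bad; result (bad, has_op)
def pvScanB (prev : Option Char) (hasOp : Bool) : List Char → Bool × Bool
  | [] => (false, hasOp)
  | c :: rest =>
    if pvOperators.contains c then
      if (match prev with | some p => pvOperators.contains p | none => false) then
        (true, hasOp)                 -- bad = True; break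
      else pvScanB (some c) true rest -- has_op = True
    else if c == '0' && (match prev with | some p => p == '0' | none => false) then
      (true, hasOp)                   -- bad = True; break
    else pvScanB (some c) hasOp rest

-- Source B's per-string test: x[0]/x[-1] guard, then the single pass
def pvKeepB (x : String) : Bool :=
  match PySem.List.pyGet? x.toList 0, PySem.List.pyGet? x.toList (-1) with
  | some h, some l =>
    if pvOperators.contains h || pvOperators.contains l then false
    else !(pvScanB none false x.toList).1 && (pvScanB none false x.toList).2
  | _, _ => false

def filter_expressions_alt (filtered : List String) : List String :=
  filtered.filter pvKeepB

-- ===== PRECONDITION & SPEC =====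
-- Pre_ excludes lists containing the empty string: there A's first filter evaluates ""[0]
-- and raises IndexError (when the returned iterator is consumed), as does B.
def Pre_filter_expressions (filtered : List String) : Prop := ∀ s ∈ filtered, s ≠ ""
instance (filtered : List String) : Decidable (Pre_filter_expressions filtered) := by
  unfold Pre_filter_expressions; infer_instance

def pvWitness_filter_expressions : List String := ["1+1", "00+3", "2**2", "7"]

def Spec_filter_expressions (filtered : List String) (out : List String) : Prop := out = filter_expressions_alt filtered
instance (filtered : List String) (out : List String) : Decidable (Spec_filter_expressions filtered out) := by unfold Spec_filter_expressions; infer_instance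

-- ===== CLAIM (what is proved, stated in full; the proofs are below) =====
def Claim_equal_filter_expressions : Prop := ∀ (filtered : List String), Dom_filter_expressions filtered → Pre_filter_expressions filtered → Spec_filter_expressions filtered (filter_expressions filtered)

-- ===== LEMMAS AND PROOFS =====

theorem pvOp_ne_zero {c : Char} (h : c ∈ pvOperators) : (c == '0') = false := by
  fin_cases h <;> rfl

-- adjacent occurrence of the two-character pattern a,b
def pvAdj (a b : Char) : List Char → Bool
  | c :: d :: r => (c == a && d == b) || pvAdj a b (d :: r)
  | _ => false

-- A's combined "00"/double-operator adjacency condition, as one chain over the characters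
def pvChainBad : Option Char → List Char → Bool
  | _, [] => false
  | prev, c :: r =>
    ((pvOperators.contains c && (match prev with | some p => pvOperators.contains p | none => false)) ||
     (c == '0' && (match prev with | some p => p == '0' | none => false))) || pvChainBad (some c) r

-- adjacent pair of operators
def pvAdjOps : List Char → Bool
  | c :: d :: r => (pvOperators.contains c && pvOperators.contains d) || pvAdjOps (d :: r)
  | _ => false

theorem pvAdj_iff_infix (a b : Char) (cs : List Char) :
    pvAdj a b cs = true ↔ [a, b] <:+: cs := by
  induction cs with
  | nil => simp [pvAdj]
  | cons c r ih =>
    cases r with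
    | nil =>
      simp only [pvAdj, List.infix_cons_iff]
      constructor
      · simp
      · rintro (h | h)
        · have := h.length_le; simp at this
        · simp at h
    | cons d t =>
      rw [show pvAdj a b (c :: d :: t) = ((c == a && d == b) || pvAdj a b (d :: t)) from rfl]
      rw [List.infix_cons_iff]
      constructor
      · intro h
        rcases Bool.or_eq_true_iff.mp h with h | h
        · left
          obtain ⟨h1, h2⟩ := Bool.and_eq_true_iff.mp h
          simp_all [List.cons_prefix_cons]
        · right; exact (ih).mp h
      · intro h
        rcases h with h | h
        · have : a = c ∧ b = d := by
            rcases List.cons_prefix_cons.mp h with ⟨h1, h2⟩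
            rcases List.cons_prefix_cons.mp h2 with ⟨h3, _⟩
            exact ⟨h1, h3⟩
          simp [this.1, this.2]
        · simp [ih.mpr h]

theorem pvSingleton_infix_iff (a : Char) (cs : List Char) :
    [a] <:+: cs ↔ a ∈ cs := by
  induction cs with
  | nil => simp
  | cons c r ih => rw [List.infix_cons_iff]; simp [ih, List.cons_prefix_cons]

theorem pvIsIn_pair (a b : Char) (cs : List Char) :
    PySem.Chars.isIn [a, b] cs = pvAdj a b cs := by
  rw [Bool.eq_iff_iff, PySem.Chars.isIn_iff_infix, pvAdj_iff_infix]

theorem pvIsIn_singleton (a : Char) (cs : List Char) :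
    PySem.Chars.isIn [a] cs = cs.contains a := by
  rw [Bool.eq_iff_iff, PySem.Chars.isIn_iff_infix, pvSingleton_infix_iff]
  simp

-- the scan of B computes exactly (chainBad, hasOp ∨ some operator seen), on the kept component
theorem pvScanB_keep (cs : List Char) : ∀ (prev : Option Char) (h : Bool),
    (!(pvScanB prev h cs).1 && (pvScanB prev h cs).2) =
      (!pvChainBad prev cs && (h || cs.any (pvOperators.contains ·))) := by
  induction cs with
  | nil => intro prev h; simp [pvScanB, pvChainBad]
  | cons c r ih =>
    intro prev h
    cases prev with
    | none =>
      by_cases hc : c ∈ pvOperators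
      · have hc0 : (c == '0') = false := pvOp_ne_zero hc
        simp [pvScanB, pvChainBad, hc, hc0, ih]
      · simp [pvScanB, pvChainBad, hc, ih]
    | some p =>
      by_cases hc : c ∈ pvOperators
      · have hc0 : (c == '0') = false := pvOp_ne_zero hc
        by_cases hp : p ∈ pvOperators
        · simp [pvScanB, pvChainBad, hc, hp, hc0]
        · simp [pvScanB, pvChainBad, hc, hp, hc0, ih]
      · by_cases hz : (c == '0' && p == '0') = true
        · simp [pvScanB, pvChainBad, hc, hz]
        · simp [pvScanB, pvChainBad, hc, hz, ih]

-- pvChainBad from a previous character is adjacency over prev :: cs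
theorem pvChainBad_some (p : Char) (cs : List Char) :
    pvChainBad (some p) cs = (pvAdj '0' '0' (p :: cs) || pvAdjOps (p :: cs)) := by
  induction cs generalizing p with
  | nil => simp [pvChainBad, pvAdj, pvAdjOps]
  | cons c r ih =>
    show (((pvOperators.contains c && pvOperators.contains p) ||
        (c == '0' && p == '0')) || pvChainBad (some c) r) = _
    rw [ih]
    show _ = (((p == '0' && c == '0') || pvAdj '0' '0' (c :: r)) ||
       ((pvOperators.contains p && pvOperators.contains c) || pvAdjOps (c :: r)))
    cases pvOperators.contains c <;> cases pvOperators.contains p <;>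
      cases p == '0' <;> cases c == '0' <;> simp

theorem pvChainBad_none_cons (c : Char) (r : List Char) :
    pvChainBad none (c :: r) = (pvAdj '0' '0' (c :: r) || pvAdjOps (c :: r)) := by
  rw [show pvChainBad none (c :: r) =
      (((pvOperators.contains c && false) || (c == '0' && false)) || pvChainBad (some c) r) from rfl]
  simp [pvChainBad_some]

-- A's "contains an operator" pass is a per-character test
theorem pvAnyOp_eq (cs : List Char) :
    (pvOperators.any (fun o => PySem.Chars.isIn [o] cs)) = cs.any (pvOperators.contains ·) := by
  simp only [pvIsIn_singleton]
  rw [Bool.eq_iff_iff]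
  simp only [List.any_eq_true, List.contains_iff_mem]
  tauto

-- A's double-operator table pass is the adjacent-operator-pair test
theorem pvAnyDouble_eq (cs : List Char) :
    ((pvOperators.flatMap (fun a => pvOperators.map (fun b => [a, b]))).any
      (fun o => PySem.Chars.isIn o cs)) = pvOperators.any (fun a => pvOperators.any (fun b => pvAdj a b cs)) := by
  simp only [List.any_flatMap, List.any_map, Function.comp_def, pvIsIn_pair]

theorem pvAnyAdj_eq (cs : List Char) :
    (pvOperators.any (fun a => pvOperators.any (fun b => pvAdj a b cs))) = pvAdjOps cs := by
  induction cs with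
  | nil => simp [pvAdj, pvAdjOps, pvOperators]
  | cons c r ih =>
    cases r with
    | nil => simp [pvAdj, pvAdjOps, pvOperators]
    | cons d t =>
      rw [show pvAdjOps (c :: d :: t) =
          ((pvOperators.contains c && pvOperators.contains d) || pvAdjOps (d :: t)) from rfl]
      rw [← ih]
      simp only [show ∀ a b, pvAdj a b (c :: d :: t) =
          ((c == a && d == b) || pvAdj a b (d :: t)) from fun _ _ => rfl]
      rw [Bool.eq_iff_iff]
      simp only [List.any_eq_true, Bool.or_eq_true, Bool.and_eq_true, List.contains_iff_mem,
        beq_iff_eq]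
      constructor
      · rintro ⟨a, ha, b, hb, ⟨h1, h2⟩ | h⟩
        · exact Or.inl ⟨h1 ▸ ha, h2 ▸ hb⟩
        · exact Or.inr ⟨a, ha, b, hb, h⟩
      · rintro (⟨h1, h2⟩ | ⟨a, ha, b, hb, h⟩)
        · exact ⟨c, h1, d, h2, Or.inl ⟨rfl, rfl⟩⟩
        · exact ⟨a, ha, b, hb, Or.inr h⟩

theorem pv_toList_ne_nil {x : String} (hx : x ≠ "") : x.toList ≠ [] := by
  intro h
  apply hx
  have := congrArg String.ofList h
  simpa using this

theorem keep_eq (x : String) (hx : x ≠ "") :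
    ((match PySem.List.pyGet? x.toList 0 with
      | some c => !pvOperators.contains c
      | none => false) &&
     ((match PySem.List.pyGet? x.toList (-1) with
      | some c => !pvOperators.contains c
      | none => false) &&
     ((!PySem.Chars.isIn ['0','0'] x.toList) &&
     ((pvOperators.any (fun o => PySem.Chars.isIn [o] x.toList)) &&
     (!(pvOperators.flatMap (fun a => pvOperators.map (fun b => [a, b]))).any
        (fun o => PySem.Chars.isIn o x.toList)))))) = pvKeepB x := by
  unfold pvKeepB
  rcases hcs : x.toList with _ | ⟨c, t⟩
  · exact absurd hcs (pv_toList_ne_nil hx)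
  · rw [← hcs]
    have h0 : PySem.List.pyGet? x.toList 0 = some c := by
      rw [PySem.List.pyGet?_zero, hcs]; rfl
    rcases heq : x.toList.getLast? with _ | l
    · rw [List.getLast?_eq_none_iff] at heq
      exact absurd (hcs ▸ heq) (by simp)
    have hl : PySem.List.pyGet? x.toList (-1) = some l := by
      rw [PySem.List.pyGet?_neg_one, heq]
    rw [h0, hl, pvIsIn_pair, pvAnyOp_eq, pvAnyDouble_eq, pvAnyAdj_eq, pvScanB_keep]
    rw [show pvChainBad none x.toList = (pvAdj '0' '0' x.toList || pvAdjOps x.toList) from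
      hcs ▸ pvChainBad_none_cons c t]
    generalize pvOperators.contains c = A
    generalize pvOperators.contains l = B
    generalize pvAdj '0' '0' x.toList = C
    generalize pvAdjOps x.toList = D
    generalize x.toList.any (fun y => pvOperators.contains y) = E
    cases A <;> cases B <;> cases C <;> cases D <;> cases E <;> simp

-- ===== VERDICT (by name: the statement is the Claim_ definition above) =====
theorem filter_expressions_spec : Claim_equal_filter_expressions := by
  intro filtered _ hpre
  unfold Spec_filter_expressions filter_expressions filter_expressions_alt
  simp only [List.filter_filter]
  apply List.filter_congr
  intro x hx
  rw [← keep_eq x (hpre x hx)]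
  ac_rfl
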